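-- pv_equiv track=rewrite | github.com/andrsnfp/IA2025 | src/training_data/dataset.py | determine_best_move
-- ===== SOURCE A (Python) =====
-- def determine_best_move(left, right, up, down):
--     # Define the priority of moves
--     cell_priority = ["T", "L", "?"]  # Prioritize treasure, then free cells, then unknown
--     move_options = {
--         "left": left,
--         "right": right,
--         "up": up,
--         "down": down
--     }
--
--     # Filter moves based on priority
--     for cell_type in cell_priority:
--         for direction, cell in move_options.items():
--             if cell == cell_type:
--                 return direction
--
--     # If no valid move, return None (shouldn't happen with valid input)
--     return None
-- ===== SOURCE B (Python) =====
-- def determine_best_move(left, right, up, down):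
--     # Single argmin pass: rank cells by priority and keep the first direction
--     # (in left,right,up,down order) with the strictly smallest rank.
--     rank = {"T": 0, "L": 1, "?": 2}
--     best_rank = 3
--     best_direction = None
--     for direction, cell in (("left", left), ("right", right), ("up", up), ("down", down)):
--         r = rank.get(cell, 3)
--         if r < best_rank:
--             best_rank = r
--             best_direction = direction
--     return best_direction
-- ===== Notes on version B (the rewrite author's own statement) =====
-- stated objective: alternative
-- what changed: Replaced the nested priority-outer/direction-inner scan with a single argmin pass over the four directions using a rank dict and strict-< update (ties keep the earlier direction).
import Mathlib
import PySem

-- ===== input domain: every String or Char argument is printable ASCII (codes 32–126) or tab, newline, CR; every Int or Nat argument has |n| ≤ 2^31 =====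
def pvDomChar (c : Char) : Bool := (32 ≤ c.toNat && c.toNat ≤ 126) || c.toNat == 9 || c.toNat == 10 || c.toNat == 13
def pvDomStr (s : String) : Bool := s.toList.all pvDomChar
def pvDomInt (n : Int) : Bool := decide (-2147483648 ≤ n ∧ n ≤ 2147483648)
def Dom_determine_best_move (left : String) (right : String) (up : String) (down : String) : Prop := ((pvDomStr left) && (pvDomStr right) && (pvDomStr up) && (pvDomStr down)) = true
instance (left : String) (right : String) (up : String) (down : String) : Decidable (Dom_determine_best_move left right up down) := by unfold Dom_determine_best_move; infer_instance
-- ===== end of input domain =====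

-- B replaces A's nested priority-outer/direction-inner scan with one argmin pass over the
-- four directions keyed by a rank dict (objective: alternative decomposition, same cost).


-- ===== PORT A =====
-- inner loop: 'for direction, cell in move_options.items(): if cell == cell_type: return direction'
def dbmInner (cell_type : String) (opts : List (String × String)) : Option String :=
  match opts with
  | [] => none
  | (direction, cell) :: rest =>
      if cell == cell_type then some direction else dbmInner cell_type rest

-- outer loop: 'for cell_type in cell_priority: …'
def dbmOuter (pri : List String) (opts : List (String × String)) : Option String :=
  match pri with
  | [] => none
  | ct :: rest =>
      match dbmInner ct opts with
      | some d => some d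
      | none => dbmOuter rest opts

def determine_best_move (left : String) (right : String) (up : String) (down : String) : Option String :=
  dbmOuter ["T", "L", "?"] [("left", left), ("right", right), ("up", up), ("down", down)]

-- ===== PORT B =====
def dbmRank : PySem.Dict String Int :=
  PySem.Dict.ofList [("T", 0), ("L", 1), ("?", 2)]

def determine_best_move_alt (left : String) (right : String) (up : String) (down : String) : Option String :=
  (([("left", left), ("right", right), ("up", up), ("down", down)] : List (String × String)).foldl
    (fun (st : Int × Option String) p =>
      let r := PySem.Dict.getD dbmRank p.2 3
      if r < st.1 then (r, some p.1) else st) (3, none)).2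

-- ===== PRECONDITION & SPEC =====
def Spec_determine_best_move (left : String) (right : String) (up : String) (down : String) (out : Option String) : Prop := out = determine_best_move_alt left right up down
instance (left : String) (right : String) (up : String) (down : String) (out : Option String) : Decidable (Spec_determine_best_move left right up down out) := by unfold Spec_determine_best_move; infer_instance

-- ===== CLAIM (what is proved, stated in full; the proofs are below) =====
def Claim_equal_determine_best_move : Prop := ∀ (left : String) (right : String) (up : String) (down : String), Dom_determine_best_move left right up down → Spec_determine_best_move left right up down (determine_best_move left right up down)

-- ===== LEMMAS AND PROOFS =====

-- rank of a cell string: 0="T", 1="L", 2="?", 3=anything else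
def qRank (c : String) : Fin 4 :=
  if c == "T" then 0 else if c == "L" then 1 else if c == "?" then 2 else 3

-- A's loops replayed over ranks instead of cell strings
def innerF (i : Fin 4) : List (String × Fin 4) → Option String
  | [] => none
  | (dir, cell) :: rest => if cell == i then some dir else innerF i rest

def outerF : List (Fin 4) → List (String × Fin 4) → Option String
  | [], _ => none
  | i :: rest, opts =>
      match innerF i opts with
      | some d => some d
      | none => outerF rest opts

def fA (a b c d : Fin 4) : Option String :=
  outerF [0, 1, 2] [("left", a), ("right", b), ("up", c), ("down", d)]

-- B's fold replayed over ranks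
def fB (a b c d : Fin 4) : Option String :=
  (([("left", a), ("right", b), ("up", c), ("down", d)] : List (String × Fin 4)).foldl
    (fun (st : Int × Option String) p =>
      if ((p.2.val : Int)) < st.1 then ((p.2.val : Int), some p.1) else st) (3, none)).2

lemma qT (c : String) : (qRank c == (0 : Fin 4)) = (c == "T") := by
  unfold qRank; split_ifs <;> simp_all

lemma qL (c : String) : (qRank c == (1 : Fin 4)) = (c == "L") := by
  unfold qRank; split_ifs <;> simp_all

lemma qQ (c : String) : (qRank c == (2 : Fin 4)) = (c == "?") := by
  unfold qRank; split_ifs <;> simp_all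

lemma rank_items : dbmRank = PySem.Dict.mk [("T", (0:Int)), ("L", 1), ("?", 2)] := by
  decide

lemma rank_q (c : String) : PySem.Dict.getD dbmRank c 3 = ((qRank c).val : Int) := by
  rw [rank_items]
  unfold qRank
  by_cases h1 : c = "T"
  · subst h1; decide
  by_cases h2 : c = "L"
  · subst h2; decide
  by_cases h3 : c = "?"
  · subst h3; decide
  · have h1' : ¬ "T" = c := fun h => h1 h.symm
    have h2' : ¬ "L" = c := fun h => h2 h.symm
    have h3' : ¬ "?" = c := fun h => h3 h.symm
    have b1 : ("T" == c) = false := beq_eq_false_iff_ne.mpr h1'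
    have b2 : ("L" == c) = false := beq_eq_false_iff_ne.mpr h2'
    have b3 : ("?" == c) = false := beq_eq_false_iff_ne.mpr h3'
    simp [PySem.Dict.getD, PySem.Dict.get?, List.find?, h1, h2, h3, b1, b2, b3]

lemma A_eq (l r u d : String) :
    determine_best_move l r u d = fA (qRank l) (qRank r) (qRank u) (qRank d) := by
  simp only [determine_best_move, fA, dbmOuter, dbmInner, outerF, innerF, qT, qL, qQ]

lemma B_eq (l r u d : String) :
    determine_best_move_alt l r u d = fB (qRank l) (qRank r) (qRank u) (qRank d) := by
  simp only [determine_best_move_alt, fB, List.foldl, rank_q]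

lemma fin_eq : ∀ a b c d : Fin 4, fA a b c d = fB a b c d := by decide

lemma key (left right up down : String) :
    determine_best_move left right up down = determine_best_move_alt left right up down := by
  rw [A_eq, B_eq, fin_eq]

-- ===== VERDICT (by name: the statement is the Claim_ definition above) =====
theorem determine_best_move_spec : Claim_equal_determine_best_move := by
  intro l r u d _
  exact key l r u d
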